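-- pv_equiv track=rewrite | github.com/AlexWUrobot/leetcode_python | Items_in_Containers.py | numberOfItems
-- ===== SOURCE A (Python) =====
-- def numberOfItems(s, startIndices, endIndices):
--     # Preprocess the string to calculate the prefix sum of items
--     prefix_sum = [0] * (len(s) + 1)
--     compartment_open = False
--     item_count = 0
--
--     for i, char in enumerate(s):
--         if char == '|':
--             compartment_open = True
--             prefix_sum[i + 1] = item_count
--         elif char == '*' and compartment_open:
--             item_count += 1
--             prefix_sum[i + 1] = item_count
--         else:
--             prefix_sum[i + 1] = item_count
--
--     # Function to count items in a single compartment
--     def count_items(start, end):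
--         if start >= end:
--             return 0
--         start_compartment = end_compartment = 0
--         # Find the position of the first compartment opening after start
--         for i in range(start, end + 1):
--             if s[i - 1] == '|':
--                 start_compartment = i
--                 break
--         # Find the position of the last compartment closing before end
--         for i in range(end, start - 1, -1):
--             if s[i - 1] == '|':
--                 end_compartment = i
--                 break
--         # Return the count of items between the compartments
--         return prefix_sum[end_compartment] - prefix_sum[start_compartment]
--
--     # Calculate the number of items for each query
--     result = []
--     for start, end in zip(startIndices, endIndices):
--         result.append(count_items(start, end))
--
--     return result
--
-- s = '|**|*|*'
--
-- startIndices = [1, 1]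
--
-- endIndices = [5, 6]
-- ===== SOURCE B (Python) =====
-- def numberOfItems(s, startIndices, endIndices):
--     n = len(s)
--     # prefix star counts: P[k] = number of '*' among the first k characters
--     P = [0]
--     for c in s:
--         P.append(P[-1] + (1 if c == '*' else 0))
--     # nxt[j] = smallest index >= j holding '|', else n  (0-based, length n+1)
--     nxt = [n] * (n + 1)
--     for j in range(n - 1, -1, -1):
--         nxt[j] = j if s[j] == '|' else nxt[j + 1]
--     # prv[k] = largest index < k holding '|', else -1  (0-based, length n+1)
--     prv = [-1] * (n + 1)
--     for j in range(n):
--         prv[j + 1] = j if s[j] == '|' else prv[j]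
--     res = []
--     for a, b in zip(startIndices, endIndices):
--         if a < b:
--             j1 = nxt[a - 1]
--             if j1 <= b - 1:
--                 j2 = prv[b]
--                 res.append(P[j2 + 1] - P[j1 + 1])
--             else:
--                 res.append(0)
--         else:
--             res.append(0)
--     return res
-- ===== Notes on version B (the rewrite author's own statement) =====
-- stated objective: alternative
-- what changed: A rescans the string with two linear loops for every query; B precomputes a star-prefix array plus nearest-pipe-right (nxt) and nearest-pipe-left (prv) arrays once and answers each query with array lookups instead of scans.
-- outside the precondition, e.g. on numberOfItems('|x|*', [-2], [3]): A returns [-1], B returns [0]; on numberOfItems('|**|', [0], [2]): A returns [0], B returns [0]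
import Mathlib
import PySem

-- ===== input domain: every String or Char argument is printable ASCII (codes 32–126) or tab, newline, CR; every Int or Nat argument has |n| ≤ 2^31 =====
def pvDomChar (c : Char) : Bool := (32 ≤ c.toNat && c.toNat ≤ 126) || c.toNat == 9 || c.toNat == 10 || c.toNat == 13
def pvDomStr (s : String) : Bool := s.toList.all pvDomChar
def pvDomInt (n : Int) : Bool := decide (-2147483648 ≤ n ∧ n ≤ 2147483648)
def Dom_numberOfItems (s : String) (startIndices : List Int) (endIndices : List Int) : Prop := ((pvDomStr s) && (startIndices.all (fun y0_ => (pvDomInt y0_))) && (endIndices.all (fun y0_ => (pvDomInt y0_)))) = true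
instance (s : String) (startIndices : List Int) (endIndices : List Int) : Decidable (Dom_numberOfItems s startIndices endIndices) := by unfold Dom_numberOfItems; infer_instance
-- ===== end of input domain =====

-- B replaces A's per-query linear scans by nearest-pipe-right/left arrays and a plain star-prefix
-- array precomputed once, answering each query by array lookups (objective: alternative).

-- ===== PORT A =====
-- one step of A's prefix_sum loop: state = (prefix_sum, compartment_open, item_count)
def pvA_step (st : List Int × Bool × Int) (p : Int × Char) : List Int × Bool × Int :=
  match st, p with
  | (ps, op, cnt), (i, c) =>
    if c = '|' then (PySem.List.pySetD ps (i + 1) cnt, true, cnt)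
    else if c = '*' ∧ op = true then (PySem.List.pySetD ps (i + 1) (cnt + 1), op, cnt + 1)
    else (PySem.List.pySetD ps (i + 1) cnt, op, cnt)

def pvA_prefix (s : String) : List Int :=
  ((PySem.List.enumerate s.toList 0).foldl pvA_step
    (List.replicate (s.toList.length + 1) 0, false, 0)).1

-- 'for i in …: if s[i-1] == '|': <hit> = i; break' with <hit> defaulting to 0
def pvA_find (s : String) : List Int → Int
  | [] => 0
  | i :: rest => if PySem.Str.pyGet? s (i - 1) = some '|' then i else pvA_find s rest

def pvA_count (s : String) (ps : List Int) (a b : Int) : Int :=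
  if a ≥ b then 0
  else
    let sc := pvA_find s (PySem.List.pyRange a (b + 1) 1)
    let ec := pvA_find s (PySem.List.pyRange b (a - 1) (-1))
    PySem.List.pyGetD ps ec 0 - PySem.List.pyGetD ps sc 0

def numberOfItems (s : String) (startIndices : List Int) (endIndices : List Int) : List Int :=
  let ps := pvA_prefix s
  (List.zip startIndices endIndices).foldl (fun acc p => acc ++ [pvA_count s ps p.1 p.2]) []

-- ===== PORT B =====
-- P[k] = number of '*' among the first k characters (Source B's append loop)
def pvB_P (acc : Int) : List Char → List Int
  | [] => []
  | c :: rest => (acc + (if c = '*' then 1 else 0)) :: pvB_P (acc + (if c = '*' then 1 else 0)) rest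

-- nxt[j] = smallest index ≥ j holding '|', else n (Source B's backwards fill: entry j from entry j+1)
def pvB_nxt (n j : Int) : List Char → List Int
  | [] => [n]
  | c :: rest => (if c = '|' then j else (pvB_nxt n (j + 1) rest).headD n) :: pvB_nxt n (j + 1) rest

-- prv[k] = largest index < k holding '|', else -1 (Source B's forward fill: entry k+1 from entry k)
def pvB_prv (p j : Int) : List Char → List Int
  | [] => []
  | c :: rest => (if c = '|' then j else p) :: pvB_prv (if c = '|' then j else p) (j + 1) rest

def pvB_query (P nxt prv : List Int) (n a b : Int) : Int :=
  if a < b then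
    let j1 := PySem.List.pyGetD nxt (a - 1) n
    if j1 ≤ b - 1 then
      let j2 := PySem.List.pyGetD prv b (-1)
      PySem.List.pyGetD P (j2 + 1) 0 - PySem.List.pyGetD P (j1 + 1) 0
    else 0
  else 0

def numberOfItems_alt (s : String) (startIndices : List Int) (endIndices : List Int) : List Int :=
  let cs := s.toList
  let n : Int := cs.length
  let P := 0 :: pvB_P 0 cs
  let nxt := pvB_nxt n 0 cs
  let prv := (-1) :: pvB_prv (-1) 0 cs
  (List.zip startIndices endIndices).map (fun p => pvB_query P nxt prv n p.1 p.2)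

-- ===== PRECONDITION & SPEC =====
-- Pre_ keeps every query inside the string's 1-based index range (or degenerate, start ≥ end, which
-- A answers 0 before touching the string); outside it A either raises IndexError or returns accidental
-- values produced by Python's negative-index wraparound in s[i-1]/prefix_sum[...], which no
-- implementation should specify.
def Pre_numberOfItems (s : String) (startIndices : List Int) (endIndices : List Int) : Prop :=
  ∀ p ∈ List.zip startIndices endIndices, p.2 ≤ p.1 ∨ (1 ≤ p.1 ∧ p.2 ≤ (s.toList.length : Int))
instance (s : String) (startIndices : List Int) (endIndices : List Int) : Decidable (Pre_numberOfItems s startIndices endIndices) := by unfold Pre_numberOfItems; infer_instance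

def pvWitness_numberOfItems : String × List Int × List Int := ("|**|*|*", [1, 1], [5, 6])

def Spec_numberOfItems (s : String) (startIndices : List Int) (endIndices : List Int) (out : List Int) : Prop := out = numberOfItems_alt s startIndices endIndices
instance (s : String) (startIndices : List Int) (endIndices : List Int) (out : List Int) : Decidable (Spec_numberOfItems s startIndices endIndices out) := by unfold Spec_numberOfItems; infer_instance

-- ===== CLAIM (what is proved, stated in full; the proofs are below) =====
def Claim_equal_numberOfItems : Prop := ∀ (s : String) (startIndices : List Int) (endIndices : List Int), Dom_numberOfItems s startIndices endIndices → Pre_numberOfItems s startIndices endIndices → Spec_numberOfItems s startIndices endIndices (numberOfItems s startIndices endIndices)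

-- ===== LEMMAS AND PROOFS =====

-- spec-side helpers
def pvStars : List Char → Int
  | [] => 0
  | c :: rest => (if c = '*' then 1 else 0) + pvStars rest

-- offset of the first '|' of a list (its length if none)
def pvFpOff : List Char → Nat
  | [] => 0
  | c :: rest => if c = '|' then 0 else pvFpOff rest + 1

-- last-'|' fold matching pvB_prv's accumulator
def pvLpF (p j : Int) : List Char → Int
  | [] => p
  | c :: rest => pvLpF (if c = '|' then j else p) (j + 1) rest

-- A's prefix_sum value at k, expressed through plain star counts
def pvG (cs : List Char) (k : Nat) : Int :=
  pvStars (cs.take k) - pvStars (cs.take (min k (pvFpOff cs + 1)))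

theorem pvStars_append (l1 l2 : List Char) : pvStars (l1 ++ l2) = pvStars l1 + pvStars l2 := by
  induction l1 with
  | nil => simp [pvStars]
  | cons c r ih => simp [pvStars, ih]; ring

theorem pvFpOff_pipe (l : List Char) (h : pvFpOff l < l.length) : l[pvFpOff l] = '|' := by
  induction l with
  | nil => simp [pvFpOff] at h
  | cons c r ih =>
    by_cases hc : c = '|'
    · simp [pvFpOff, hc]
    · have : pvFpOff (c :: r) = pvFpOff r + 1 := by simp [pvFpOff, hc]
      simp only [this] at h ⊢
      simpa using ih (by simpa using h)

theorem pvFpOff_min (l : List Char) (t : Nat) (ht : t < l.length) (hp : l[t] = '|') :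
    pvFpOff l ≤ t := by
  induction l generalizing t with
  | nil => simp at ht
  | cons c r ih =>
    by_cases hc : c = '|'
    · simp [pvFpOff, hc]
    · have he : pvFpOff (c :: r) = pvFpOff r + 1 := by simp [pvFpOff, hc]
      rw [he]
      cases t with
      | zero => simp at hp; exact absurd hp hc
      | succ t' =>
        have := ih t' (by simpa using ht) (by simpa using hp)
        omega

theorem pvLpF_snoc (l : List Char) (p j : Int) (c : Char) :
    pvLpF p j (l ++ [c]) = if c = '|' then j + l.length else pvLpF p j l := by
  induction l generalizing p j with
  | nil => simp [pvLpF]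
  | cons d r ih =>
    simp only [List.cons_append, pvLpF, ih, List.length_cons]
    split <;> push_cast <;> ring_nf

theorem pvLpF_cases (l : List Char) (p j : Int) :
    pvLpF p j l = p ∨ (j ≤ pvLpF p j l ∧ pvLpF p j l < j + l.length) := by
  induction l generalizing p j with
  | nil => left; rfl
  | cons c r ih =>
    simp only [pvLpF]
    rcases ih (if c = '|' then j else p) (j + 1) with h | h
    · rw [h]
      by_cases hc : c = '|'
      · right; simp only [hc, if_true, List.length_cons]; push_cast; omega
      · left; simp [hc]
    · right; simp only [List.length_cons]; push_cast; omega

theorem pvLpF_pipe (l : List Char) (p j : Int) :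
    pvLpF p j l = p ∨ ∃ (k : Nat), ∃ (h : k < l.length), l[k] = '|' ∧ pvLpF p j l = j + k := by
  induction l generalizing p j with
  | nil => left; rfl
  | cons c r ih =>
    simp only [pvLpF]
    rcases ih (if c = '|' then j else p) (j + 1) with h | h
    · by_cases hc : c = '|'
      · right; refine ⟨0, by simp, by simpa, ?_⟩; rw [h]; simp [hc]
      · left; rw [h]; simp [hc]
    · obtain ⟨k, hk, hpk, hv⟩ := h
      right
      refine ⟨k + 1, by simpa using hk, by simpa using hpk, ?_⟩
      rw [hv]; push_cast; ring
theorem pvLpF_max (l : List Char) (p j : Int) (k : Nat) (hk : k < l.length) (hp : l[k] = '|') :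
    j + k ≤ pvLpF p j l := by
  induction l generalizing p j k with
  | nil => simp at hk
  | cons c r ih =>
    simp only [pvLpF]
    cases k with
    | zero =>
      simp at hp
      rcases pvLpF_cases r (if c = '|' then j else p) (j + 1) with h | h
      · rw [h]; simp [hp]
      · omega
    | succ k' =>
      have := ih (if c = '|' then j else p) (j + 1) k' (by simpa using hk) (by simpa using hp)
      push_cast
      push_cast at this
      omega

theorem pvB_nxt_ne_nil (n j : Int) (l : List Char) : pvB_nxt n j l ≠ [] := by
  cases l <;> simp [pvB_nxt]

theorem pvB_nxt_length (n j : Int) (l : List Char) : (pvB_nxt n j l).length = l.length + 1 := by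
  induction l generalizing j with
  | nil => rfl
  | cons c r ih => simp [pvB_nxt, ih]

theorem pvB_nxt_getD (l : List Char) (j0 k : Nat) (hk : k ≤ l.length) :
    (pvB_nxt ((j0 : Int) + l.length) j0 l).getD k 0
      = ((j0 + k + pvFpOff (l.drop k) : Nat) : Int) := by
  induction l generalizing j0 k with
  | nil =>
    have hk0 : k = 0 := by simpa using hk
    subst hk0
    simp [pvB_nxt, pvFpOff]
  | cons c r ih =>
    have harg : ((j0 : Int)) + ((c :: r).length : Int) = (((j0 + 1 : Nat)) : Int) + (r.length : Int) := by
      simp only [List.length_cons]; push_cast; ring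
    have hcast : ((j0 : Int)) + 1 = (((j0 + 1 : Nat)) : Int) := by push_cast; ring
    cases k with
    | zero =>
      by_cases hc : c = '|'
      · simp [pvB_nxt, hc, pvFpOff]
      · have h0 := ih (j0 + 1) 0 (Nat.zero_le _)
        cases hr : pvB_nxt ((j0 : Int) + ((c :: r).length : Int)) ((j0 : Int) + 1) r with
        | nil => exact absurd hr (pvB_nxt_ne_nil _ _ _)
        | cons x xs =>
          rw [harg, hcast] at hr
          rw [hr] at h0
          simp only [List.getD_cons_zero] at h0
          simp only [pvB_nxt, hc, if_false, List.getD_cons_zero]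
          rw [harg, hcast, hr]
          simp only [List.headD_cons, h0]
          have hnat : j0 + 1 + 0 + pvFpOff r = j0 + 0 + pvFpOff (c :: r) := by
            simp [pvFpOff, hc]; omega
          exact congrArg _ hnat
    | succ k' =>
      simp only [pvB_nxt, List.getD_cons_succ, harg, hcast, ih (j0 + 1) k' (by simpa using hk)]
      congr 1
      simp only [List.drop_succ_cons]
      omega

theorem pvB_P_getD (l : List Char) (acc : Int) (k : Nat) (hk : k ≤ l.length) :
    (acc :: pvB_P acc l).getD k 0 = acc + pvStars (l.take k) := by
  induction l generalizing acc k with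
  | nil =>
    have hk0 : k = 0 := by simpa using hk
    subst hk0
    simp [pvStars]
  | cons c r ih =>
    cases k with
    | zero => simp [pvStars]
    | succ k' =>
      simp only [pvB_P, List.getD_cons_succ, List.take_succ_cons, pvStars,
        ih (acc + if c = '*' then 1 else 0) k' (by simpa using hk)]
      ring

theorem pvB_prv_getD (l : List Char) (p j : Int) (k : Nat) (hk : k ≤ l.length) :
    (p :: pvB_prv p j l).getD k 0 = pvLpF p j (l.take k) := by
  induction l generalizing p j k with
  | nil =>
    have hk0 : k = 0 := by simpa using hk
    subst hk0
    simp [pvLpF]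
  | cons c r ih =>
    cases k with
    | zero => simp [pvLpF]
    | succ k' =>
      simp only [pvB_prv, List.getD_cons_succ, List.take_succ_cons, pvLpF]
      exact ih (if c = '|' then j else p) (j + 1) k' (by simpa using hk)

theorem pvA_find_fwd (s : String) (d : Nat) (a b : Int)
    (hd : (b + 1 - a).toNat ≤ d) (ha : 1 ≤ a) (hab : a ≤ b) (hb : b ≤ (s.toList.length : Int)) :
    pvA_find s (PySem.List.pyRange a (b + 1) 1)
      = (if (((a - 1).toNat + pvFpOff (s.toList.drop (a - 1).toNat) : Nat) : Int) ≤ b - 1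
         then (((a - 1).toNat + pvFpOff (s.toList.drop (a - 1).toNat) : Nat) : Int) + 1 else 0) := by
  induction d generalizing a with
  | zero => omega
  | succ d ih =>
    rw [PySem.List.pyRange_one_cons (by omega : a < b + 1)]
    have hja : (((a - 1).toNat : Int)) = a - 1 := Int.toNat_of_nonneg (by omega)
    have hjn : (a - 1).toNat < s.toList.length := by omega
    have hget : PySem.Str.pyGet? s (a - 1) = some (s.toList[(a - 1).toNat]) := by
      have h : PySem.Str.pyGet? s (((a - 1).toNat : Nat) : Int) = s.toList[(a - 1).toNat]? :=
        PySem.Str.pyGet?_natCast s (a - 1).toNat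
      rw [hja] at h
      rw [h, List.getElem?_eq_getElem hjn]
    have hdrop : s.toList.drop (a - 1).toNat
        = s.toList[(a - 1).toNat] :: s.toList.drop ((a - 1).toNat + 1) :=
      (List.getElem_cons_drop hjn).symm
    simp only [pvA_find, hget, Option.some.injEq]
    by_cases hc : s.toList[(a - 1).toNat] = '|'
    · rw [if_pos hc]
      have h0 : pvFpOff (s.toList.drop (a - 1).toNat) = 0 := by
        rw [hdrop]; simp only [pvFpOff]; rw [if_pos hc]
      rw [h0]
      rw [if_pos (by omega)]
      omega
    · rw [if_neg hc]
      have h1 : pvFpOff (s.toList.drop (a - 1).toNat)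
          = pvFpOff (s.toList.drop ((a - 1).toNat + 1)) + 1 := by
        rw [hdrop]; simp only [pvFpOff]; rw [if_neg hc]
      by_cases heq : a = b
      · subst heq
        rw [PySem.List.pyRange_one_eq_nil (by omega)]
        simp only [pvA_find]
        rw [if_neg (by omega)]
      · have hih := ih (a + 1) (by omega) (by omega) (by omega)
        have hsimp : a + 1 - 1 = a := by ring
        rw [hsimp] at hih
        have hat : a.toNat = (a - 1).toNat + 1 := by omega
        rw [hat] at hih
        rw [hih, h1]
        have hval : ((a - 1).toNat + (pvFpOff (s.toList.drop ((a - 1).toNat + 1)) + 1))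
            = ((a - 1).toNat + 1 + pvFpOff (s.toList.drop ((a - 1).toNat + 1))) := by omega
        rw [hval]

theorem pvA_find_bwd (s : String) (d : Nat) (a b : Int)
    (hd : (b - a + 1).toNat ≤ d) (ha : 1 ≤ a) (hab : a ≤ b) (hb : b ≤ (s.toList.length : Int)) :
    pvA_find s (PySem.List.pyRange b (a - 1) (-1))
      = (if a - 1 ≤ pvLpF (-1) 0 (s.toList.take b.toNat)
         then pvLpF (-1) 0 (s.toList.take b.toNat) + 1 else 0) := by
  induction d generalizing b with
  | zero => omega
  | succ d ih =>
    rw [PySem.List.pyRange_neg_one_cons (by omega : a - 1 < b)]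
    have hja : (((b - 1).toNat : Int)) = b - 1 := Int.toNat_of_nonneg (by omega)
    have hjn : (b - 1).toNat < s.toList.length := by omega
    have hbt : b.toNat = (b - 1).toNat + 1 := by omega
    have hget : PySem.Str.pyGet? s (b - 1) = some (s.toList[(b - 1).toNat]) := by
      have h : PySem.Str.pyGet? s (((b - 1).toNat : Nat) : Int) = s.toList[(b - 1).toNat]? :=
        PySem.Str.pyGet?_natCast s (b - 1).toNat
      rw [hja] at h
      rw [h, List.getElem?_eq_getElem hjn]
    have htake : s.toList.take b.toNat
        = s.toList.take (b - 1).toNat ++ [s.toList[(b - 1).toNat]] := by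
      rw [hbt, List.take_add_one, List.getElem?_eq_getElem hjn]
      rfl
    have hlen : (s.toList.take (b - 1).toNat).length = (b - 1).toNat := by
      rw [List.length_take]; omega
    have hsnoc := pvLpF_snoc (s.toList.take (b - 1).toNat) (-1) 0 (s.toList[(b - 1).toNat])
    rw [hlen] at hsnoc
    simp only [pvA_find, hget, Option.some.injEq]
    by_cases hc : s.toList[(b - 1).toNat] = '|'
    · rw [if_pos hc]
      rw [htake, hsnoc, if_pos hc]
      rw [if_pos (by omega)]
      omega
    · rw [if_neg hc]
      rw [htake, hsnoc, if_neg hc]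
      by_cases heq : a = b
      · -- remaining range empty
        rw [PySem.List.pyRange_neg_one_eq_nil (by omega)]
        simp only [pvA_find]
        rcases pvLpF_cases (s.toList.take (b - 1).toNat) (-1) 0 with h | h
        · rw [if_neg (by omega)]
        · rw [hlen] at h
          rw [if_neg (by omega)]
      · have hih := ih (b - 1) (by omega) (by omega) (by omega)
        rw [hih]

theorem pvGetD_set (l : List Int) (i k : Nat) (v : Int) (hi : i < l.length) :
    (l.set i v).getD k 0 = if k = i then v else l.getD k 0 := by
  unfold List.getD
  rw [List.getElem?_set]
  by_cases h : k = i
  · simp [h, hi]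
  · simp [h, Ne.symm h]

theorem pvG_zero (cs : List Char) : pvG cs 0 = 0 := by
  simp [pvG, pvStars]

theorem pvG_succ (cs : List Char) (m : Nat) (hm : m < cs.length) :
    pvG cs (m + 1) = pvG cs m + (if cs[m] = '*' ∧ pvFpOff cs < m then 1 else 0) := by
  have htake : cs.take (m + 1) = cs.take m ++ [cs[m]] := by
    rw [List.take_add_one, List.getElem?_eq_getElem hm]
    rfl
  have hstars : pvStars (cs.take (m + 1))
      = pvStars (cs.take m) + (if cs[m] = '*' then 1 else 0) := by
    rw [htake, pvStars_append]
    simp [pvStars]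
  rcases lt_trichotomy (pvFpOff cs) m with hlt | heq | hgt
  · have h1 : min (m + 1) (pvFpOff cs + 1) = pvFpOff cs + 1 := by omega
    have h2 : min m (pvFpOff cs + 1) = pvFpOff cs + 1 := by omega
    unfold pvG
    rw [h1, h2, hstars]
    by_cases hc : cs[m] = '*'
    · rw [if_pos hc, if_pos ⟨hc, hlt⟩]
      ring
    · rw [if_neg hc, if_neg (by tauto)]
      ring
  · subst heq
    have hpipe : cs[pvFpOff cs] = '|' := pvFpOff_pipe cs hm
    have hcond : ¬(cs[pvFpOff cs] = '*' ∧ pvFpOff cs < pvFpOff cs) := by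
      intro h
      omega
    unfold pvG
    rw [if_neg hcond, min_self, min_eq_left (by omega)]
    simp
  · have h1 : min (m + 1) (pvFpOff cs + 1) = m + 1 := by omega
    have h2 : min m (pvFpOff cs + 1) = m := by omega
    have hcond : ¬(cs[m] = '*' ∧ pvFpOff cs < m) := by
      intro h
      omega
    unfold pvG
    rw [h1, h2, if_neg hcond]
    ring

theorem pvA_prefix_inv (s : String) (rest : List Char) (m : Nat) (ps : List Int) (op : Bool) (cnt : Int)
    (hrest : s.toList.drop m = rest)
    (hlen : ps.length = s.toList.length + 1)
    (hps : ∀ k : Nat, k ≤ s.toList.length → ps.getD k 0 = if k ≤ m then pvG s.toList k else 0)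
    (hop : op = decide (pvFpOff s.toList < m))
    (hcnt : cnt = pvG s.toList m) :
    ∀ k : Nat, k ≤ s.toList.length →
      ((PySem.List.enumerate rest (m : Int)).foldl pvA_step (ps, op, cnt)).1.getD k 0
        = pvG s.toList k := by
  induction rest generalizing m ps op cnt with
  | nil =>
    intro k hk
    have hmn : s.toList.length ≤ m := by
      have hl := congrArg List.length hrest
      rw [List.length_drop] at hl
      simp only [List.length_nil] at hl
      omega
    simp only [PySem.List.enumerate_nil, List.foldl_nil]
    rw [hps k hk, if_pos (by omega)]
  | cons c rest' ih =>
    have hm : m < s.toList.length := by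
      have hl := congrArg List.length hrest
      rw [List.length_drop] at hl
      simp only [List.length_cons] at hl
      omega
    have hcm : s.toList[m] = c := by
      have h0 : (s.toList.drop m)[0]'(by rw [hrest]; simp) = c := by
        simp [hrest]
      rw [List.getElem_drop] at h0
      simpa using h0
    have hrest' : s.toList.drop (m + 1) = rest' := by
      have ht := congrArg List.tail hrest
      rw [List.tail_drop] at ht
      simpa using ht
    have hcast : ((m : Int)) + 1 = (((m + 1 : Nat)) : Int) := by push_cast; ring
    have hset : ∀ v : Int, PySem.List.pySetD ps ((m : Int) + 1) v = ps.set (m + 1) v := by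
      intro v
      rw [hcast, PySem.List.pySetD_natCast]
    have hf0m : ¬ s.toList[m] = '|' → (pvFpOff s.toList < m ↔ pvFpOff s.toList < m + 1) := by
      intro hc
      constructor
      · omega
      · intro h
        rcases Nat.lt_or_ge (pvFpOff s.toList) m with h' | h'
        · exact h'
        · have hEq : pvFpOff s.toList = m := by omega
          have hP := pvFpOff_pipe s.toList (by omega)
          exact absurd (hEq ▸ hP) hc
    rw [PySem.List.enumerate_cons, List.foldl_cons]
    by_cases hc : c = '|'
    · have hg : pvG s.toList (m + 1) = pvG s.toList m := by
        rw [pvG_succ s.toList m hm, hcm, hc, if_neg (fun h => absurd h.1 (by decide))]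
        ring
      have hstep : pvA_step (ps, op, cnt) ((m : Int), c) = (ps.set (m + 1) cnt, true, cnt) := by
        simp only [pvA_step]
        rw [if_pos hc, hset]
      rw [hstep, hcast]
      refine ih (m + 1) _ _ _ hrest' (by simp [hlen]) ?_ ?_ ?_
      · intro k hk
        rw [pvGetD_set ps (m + 1) k cnt (by omega), hps k hk]
        by_cases hkm : k = m + 1
        · rw [if_pos hkm, if_pos (by omega), hkm, hg, hcnt]
        · rw [if_neg hkm]
          by_cases h2 : k ≤ m
          · rw [if_pos h2, if_pos (by omega)]
          · rw [if_neg h2, if_neg (by omega)]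
      · have hle : pvFpOff s.toList ≤ m := pvFpOff_min s.toList m hm (by rw [hcm, hc])
        have hlt : pvFpOff s.toList < m + 1 := by omega
        simp [hlt]
      · rw [hcnt, hg]
    · by_cases hso : c = '*' ∧ op = true
      · have hfo : pvFpOff s.toList < m := by
          have := hso.2
          rw [hop] at this
          simpa using this
        have hg : pvG s.toList (m + 1) = pvG s.toList m + 1 := by
          rw [pvG_succ s.toList m hm, hcm, if_pos ⟨hso.1, hfo⟩]
        have hstep : pvA_step (ps, op, cnt) ((m : Int), c)
            = (ps.set (m + 1) (cnt + 1), op, cnt + 1) := by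
          simp only [pvA_step]
          rw [if_neg hc, if_pos hso, hset]
        rw [hstep, hcast]
        refine ih (m + 1) _ _ _ hrest' (by simp [hlen]) ?_ ?_ ?_
        · intro k hk
          rw [pvGetD_set ps (m + 1) k (cnt + 1) (by omega), hps k hk]
          by_cases hkm : k = m + 1
          · rw [if_pos hkm, if_pos (by omega), hkm, hg, hcnt]
          · rw [if_neg hkm]
            by_cases h2 : k ≤ m
            · rw [if_pos h2, if_pos (by omega)]
            · rw [if_neg h2, if_neg (by omega)]
        · rw [hop]
          simp only [decide_eq_decide]
          omega
        · rw [hcnt, hg]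
      · have hcond : ¬(s.toList[m] = '*' ∧ pvFpOff s.toList < m) := by
          rw [hcm]
          intro h
          apply hso
          refine ⟨h.1, ?_⟩
          rw [hop]
          simpa using h.2
        have hg : pvG s.toList (m + 1) = pvG s.toList m := by
          rw [pvG_succ s.toList m hm, if_neg hcond]
          ring
        have hstep : pvA_step (ps, op, cnt) ((m : Int), c) = (ps.set (m + 1) cnt, op, cnt) := by
          simp only [pvA_step]
          rw [if_neg hc, if_neg hso, hset]
        rw [hstep, hcast]
        refine ih (m + 1) _ _ _ hrest' (by simp [hlen]) ?_ ?_ ?_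
        · intro k hk
          rw [pvGetD_set ps (m + 1) k cnt (by omega), hps k hk]
          by_cases hkm : k = m + 1
          · rw [if_pos hkm, if_pos (by omega), hkm, hg, hcnt]
          · rw [if_neg hkm]
            by_cases h2 : k ≤ m
            · rw [if_pos h2, if_pos (by omega)]
            · rw [if_neg h2, if_neg (by omega)]
        · rw [hop]
          simp only [decide_eq_decide]
          exact hf0m (by rw [hcm]; exact hc)
        · rw [hcnt, hg]

theorem pvA_prefix_getD (s : String) (k : Nat) (hk : k ≤ s.toList.length) :
    (pvA_prefix s).getD k 0 = pvG s.toList k := by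
  have H := pvA_prefix_inv s s.toList 0 (List.replicate (s.toList.length + 1) (0 : Int)) false 0
      (by simp) (by simp)
      (fun k hk => by
        rw [List.getD, List.getElem?_replicate, if_pos (by omega)]
        simp only [Option.getD_some]
        by_cases h2 : k ≤ 0
        · have hk0 : k = 0 := by omega
          rw [if_pos h2, hk0, pvG_zero]
        · rw [if_neg h2])
      (by simp) (pvG_zero s.toList).symm k hk
  simp only [Nat.cast_zero] at H
  unfold pvA_prefix
  exact H

theorem pvGetD_irrel (l : List Int) (k : Nat) (d : Int) (h : k < l.length) :
    l.getD k d = l.getD k 0 := by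
  simp [List.getD, List.getElem?_eq_getElem h]

theorem pvB_prv_length (p j : Int) (l : List Char) : (pvB_prv p j l).length = l.length := by
  induction l generalizing p j with
  | nil => rfl
  | cons c r ih => simp [pvB_prv, ih]

theorem pvPair (s : String) (a b : Int)
    (h : b ≤ a ∨ (1 ≤ a ∧ b ≤ (s.toList.length : Int))) :
    pvA_count s (pvA_prefix s) a b
      = pvB_query (0 :: pvB_P 0 s.toList) (pvB_nxt ((s.toList.length : Int)) 0 s.toList)
          ((-1) :: pvB_prv (-1) 0 s.toList) ((s.toList.length : Int)) a b := by
  by_cases hab : a < b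
  · rcases h with h | ⟨ha, hb⟩
    · omega
    -- main case: 1 ≤ a < b ≤ n
    have hja : (((a - 1).toNat : Int)) = a - 1 := Int.toNat_of_nonneg (by omega)
    have hbt : (((b.toNat : Nat)) : Int) = b := Int.toNat_of_nonneg (by omega)
    -- A side scans
    have hfwd := pvA_find_fwd s ((b + 1 - a).toNat) a b le_rfl (by omega) (by omega) hb
    have hbwd := pvA_find_bwd s ((b - a + 1).toNat) a b le_rfl (by omega) (by omega) hb
    -- abbreviations
    have hjn : ((a - 1).toNat) ≤ s.toList.length := by omega
    have hfval := pvB_nxt_getD s.toList 0 (a - 1).toNat hjn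
    simp only [Nat.cast_zero, zero_add] at hfval
    have hlpval := pvB_prv_getD s.toList (-1) 0 b.toNat (by omega)
    -- B side j1
    have hj1 : PySem.List.pyGetD (pvB_nxt ((s.toList.length : Int)) 0 s.toList) (a - 1)
          ((s.toList.length : Int))
        = (((a - 1).toNat + pvFpOff (s.toList.drop (a - 1).toNat) : Nat) : Int) := by
      conv_lhs => rw [← hja]
      rw [PySem.List.pyGetD_natCast,
        pvGetD_irrel _ _ _ (by rw [pvB_nxt_length]; omega), hfval]
    have hj2 : PySem.List.pyGetD ((-1) :: pvB_prv (-1) 0 s.toList) b (-1)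
        = pvLpF (-1) 0 (s.toList.take b.toNat) := by
      conv_lhs => rw [← hbt]
      rw [PySem.List.pyGetD_natCast,
        pvGetD_irrel _ _ _ (by rw [List.length_cons, pvB_prv_length]; omega), hlpval]
    -- unfold both programs
    simp only [pvA_count, pvB_query]
    rw [if_neg (by omega : ¬ a ≥ b), if_pos hab, hfwd, hbwd, hj1, hj2]
    by_cases hcond : (((a - 1).toNat + pvFpOff (s.toList.drop (a - 1).toNat) : Nat) : Int) ≤ b - 1
    · -- a pipe exists in the window
      rw [if_pos hcond, if_pos hcond]
      have hfn : (a - 1).toNat + pvFpOff (s.toList.drop (a - 1).toNat) < s.toList.length := by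
        omega
      have hofflt : pvFpOff (s.toList.drop (a - 1).toNat) < (s.toList.drop (a - 1).toNat).length := by
        rw [List.length_drop]
        omega
      have hfpipe : s.toList[(a - 1).toNat + pvFpOff (s.toList.drop (a - 1).toNat)]'hfn = '|' := by
        have := pvFpOff_pipe (s.toList.drop (a - 1).toNat) hofflt
        rwa [List.getElem_drop] at this
      have hftake : (a - 1).toNat + pvFpOff (s.toList.drop (a - 1).toNat) < b.toNat := by omega
      have hlp_ge : ((((a - 1).toNat + pvFpOff (s.toList.drop (a - 1).toNat) : Nat)) : Int)
          ≤ pvLpF (-1) 0 (s.toList.take b.toNat) := by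
        have := pvLpF_max (s.toList.take b.toNat) (-1) 0
            ((a - 1).toNat + pvFpOff (s.toList.drop (a - 1).toNat))
            (by rw [List.length_take]; omega)
            (by rw [List.getElem_take]; exact hfpipe)
        simpa using this
      have hlp_lt : pvLpF (-1) 0 (s.toList.take b.toNat) < b := by
        rcases pvLpF_cases (s.toList.take b.toNat) (-1) 0 with h' | h'
        · omega
        · rw [List.length_take] at h'
          omega
      rw [if_pos (by omega : a - 1 ≤ pvLpF (-1) 0 (s.toList.take b.toNat))]
      -- index conversions for the prefix lists
      have hlpc : (pvLpF (-1) 0 (s.toList.take b.toNat) + 1)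
          = (((pvLpF (-1) 0 (s.toList.take b.toNat) + 1).toNat : Nat) : Int) := by omega
      have hfc : ((((a - 1).toNat + pvFpOff (s.toList.drop (a - 1).toNat) : Nat)) : Int) + 1
          = ((((a - 1).toNat + pvFpOff (s.toList.drop (a - 1).toNat) + 1 : Nat)) : Int) := by
        push_cast
        ring
      rw [hfc, hlpc, PySem.List.pyGetD_natCast, PySem.List.pyGetD_natCast,
        PySem.List.pyGetD_natCast, PySem.List.pyGetD_natCast]
      have hq_le : (pvLpF (-1) 0 (s.toList.take b.toNat) + 1).toNat ≤ s.toList.length := by omega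
      have hp_le : (a - 1).toNat + pvFpOff (s.toList.drop (a - 1).toNat) + 1 ≤ s.toList.length := by
        omega
      rw [pvA_prefix_getD s _ hq_le, pvA_prefix_getD s _ hp_le,
        pvB_P_getD s.toList 0 _ hq_le, pvB_P_getD s.toList 0 _ hp_le]
      -- both sides are star-count differences; the first-pipe offset cancels
      have hf0 : pvFpOff s.toList ≤ (a - 1).toNat + pvFpOff (s.toList.drop (a - 1).toNat) :=
        pvFpOff_min s.toList _ hfn hfpipe
      unfold pvG
      rw [min_eq_right (by omega), min_eq_right (by omega)]
      ring
    · -- no pipe in the window: both sides give 0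
      rw [if_neg hcond, if_neg hcond]
      have hlpno : ¬ (a - 1 ≤ pvLpF (-1) 0 (s.toList.take b.toNat)) := by
        intro hle
        rcases pvLpF_pipe (s.toList.take b.toNat) (-1) 0 with h' | ⟨k, hk, hpk, hv⟩
        · omega
        · rw [List.length_take] at hk
          rw [List.getElem_take] at hpk
          have hkj : (a - 1).toNat ≤ k := by omega
          have hpk? : s.toList[k]? = some '|' := by
            rw [List.getElem?_eq_getElem (by omega : k < s.toList.length)]
            exact congrArg some hpk
          have hdrop? : (s.toList.drop (a - 1).toNat)[k - (a - 1).toNat]? = some '|' := by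
            rw [List.getElem?_drop, show (a - 1).toNat + (k - (a - 1).toNat) = k by omega, hpk?]
          have := pvFpOff_min (s.toList.drop (a - 1).toNat) (k - (a - 1).toNat)
              (by rw [List.length_drop]; omega)
              (Option.some.inj ((List.getElem?_eq_getElem _).symm.trans hdrop?))
          omega
      rw [if_neg hlpno]
      exact sub_self _
  · -- degenerate query: both sides answer 0
    unfold pvA_count pvB_query
    rw [if_pos (by omega : a ≥ b), if_neg hab]

-- ===== VERDICT (by name: the statement is the Claim_ definition above) =====
theorem numberOfItems_spec : Claim_equal_numberOfItems := by
  intro s si ei hdom hpre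
  show numberOfItems s si ei = numberOfItems_alt s si ei
  unfold numberOfItems numberOfItems_alt
  rw [PySem.List.foldl_append_singleton_eq_map]
  exact List.map_congr_left (fun p hp => pvPair s p.1 p.2 (hpre p hp))
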